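-- pv_equiv track=rewrite | github.com/pup-paw/Algorithm-Python | Coding_test/4.py | solution
-- ===== SOURCE A (Python) =====
-- def solution(s):
--     answer = []
--     i = 0
--     while True:
--         if i == len(s)-1 or s[i] != s[i+1]:
--             break
--         i += 1
--     s += s[:i+1]
--     s = s[i+1:]
--     tmp = 1
--     for i in range(len(s)-1):
--         if s[i] == s[i+1]:
--             tmp += 1
--         else:
--             answer.append(tmp)
--             tmp = 1
--     answer.append(tmp)
--
--     return sorted(answer)
-- ===== SOURCE B (Python) =====
-- def solution(s):
--     # one pass over the characters to collect run lengths, then an explicit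
--     # circular merge of the first and last run (instead of A's rotation trick)
--     runs = []
--     prev = s[0]
--     cnt = 0
--     for ch in s:
--         if ch == prev:
--             cnt += 1
--         else:
--             runs.append(cnt)
--             prev = ch
--             cnt = 1
--     runs.append(cnt)
--     if len(runs) > 1 and s[0] == s[-1]:
--         runs[0] += runs.pop()
--     return sorted(runs)
-- ===== Notes on version B (the rewrite author's own statement) =====
-- stated objective: simpler
-- what changed: B collects the run lengths of s in a single left-to-right pass and merges the first and last run explicitly when the string's ends hold the same character, instead of A's extra while-loop that finds the leading run and rotates it to the end of the string before counting.
import Mathlib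
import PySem

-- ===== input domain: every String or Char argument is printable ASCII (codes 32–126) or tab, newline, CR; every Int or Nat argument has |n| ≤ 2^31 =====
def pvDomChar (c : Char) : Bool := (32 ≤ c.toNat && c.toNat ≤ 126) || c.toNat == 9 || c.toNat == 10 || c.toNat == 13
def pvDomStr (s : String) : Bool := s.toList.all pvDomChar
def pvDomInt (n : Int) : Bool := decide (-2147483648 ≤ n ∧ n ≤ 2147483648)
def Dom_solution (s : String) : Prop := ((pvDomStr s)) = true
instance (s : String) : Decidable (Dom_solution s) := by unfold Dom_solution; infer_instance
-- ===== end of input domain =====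

-- B replaces A's rotate-the-leading-run-to-the-end trick by one pass collecting
-- run lengths plus an explicit merge of the first and last run (objective: simpler).

-- ===== PORT A =====
-- A's leading `while True` loop: advance i while s[i] == s[i+1]; none = IndexError (empty s).
def solutionLoopA (l : List Char) (i : Int) : Option Int :=
  if i = (l.length : Int) - 1 then some i
  else
    match hA : PySem.List.pyGet? l i, hB : PySem.List.pyGet? l (i + 1) with
    | some a, some b => if a ≠ b then some i else solutionLoopA l (i + 1)
    | _, _ => none
termination_by ((l.length : Int) - i).toNat
decreasing_by
  have h : ¬ (PySem.List.pyGet? l (i + 1) = none) := by rw [hB]; simp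
  rw [PySem.List.pyGet?_eq_none_iff] at h
  simp only [PySem.Raise.InRange, not_and_or, not_le, not_lt, or_iff_not_imp_left] at h
  omega

def solution (s : String) : List Int :=
  let l := s.toList
  match solutionLoopA l 0 with
  | none => []  -- IndexError on the empty string; excluded by Pre_solution
  | some i =>
    -- s += s[:i+1]; s = s[i+1:]
    let l2 := PySem.List.slice (l ++ PySem.List.slice l none (some (i + 1))) (some (i + 1)) none
    -- for i in range(len(s)-1): …
    let st := (PySem.List.pyRange 0 ((l2.length : Int) - 1)).foldl
      (fun (st : List Int × Int) j =>
        match PySem.List.pyGet? l2 j, PySem.List.pyGet? l2 (j + 1) with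
        | some a, some b => if a = b then (st.1, st.2 + 1) else (st.1 ++ [st.2], 1)
        | _, _ => st) ([], 1)
    PySem.List.sorted (st.1 ++ [st.2]) (fun x => x) false

-- ===== PORT B =====
def solution_alt (s : String) : List Int :=
  match s.toList with
  | [] => []  -- prev = s[0] raises IndexError on the empty string; excluded by Pre_solution
  | c :: t =>
    -- one pass: for ch in s, maintaining (runs, prev, cnt)
    let st := (c :: t).foldl
      (fun (st : List Int × Char × Int) ch =>
        if ch = st.2.1 then (st.1, st.2.1, st.2.2 + 1) else (st.1 ++ [st.2.2], ch, 1))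
      ([], c, 0)
    let runs := st.1 ++ [st.2.2]
    -- if len(runs) > 1 and s[0] == s[-1]: runs[0] += runs.pop()
    let runs := if 1 < runs.length ∧ t.getLastD c = c
      then (runs.headD 0 + runs.getLastD 0) :: runs.tail.dropLast else runs
    PySem.List.sorted runs (fun x => x) false

-- ===== PRECONDITION & SPEC =====
-- A (and B) raise IndexError on the empty string; Pre_ excludes exactly that input.
def Pre_solution (s : String) : Prop := s.toList ≠ []
instance (s : String) : Decidable (Pre_solution s) := by unfold Pre_solution; infer_instance
def pvWitness_solution : String := "aabcbb"

def Spec_solution (s : String) (out : List Int) : Prop := out = solution_alt s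
instance (s : String) (out : List Int) : Decidable (Spec_solution s out) := by unfold Spec_solution; infer_instance

-- ===== CLAIM (what is proved, stated in full; the proofs are below) =====
def Claim_equal_solution : Prop := ∀ (s : String), Dom_solution s → Pre_solution s → Spec_solution s (solution s)

-- ===== LEMMAS AND PROOFS =====

def runGo (c : Char) (n : Int) : List Char → List Int
  | [] => [n]
  | d :: t => if d = c then runGo c (n + 1) t else n :: runGo d 1 t

def runsOf : List Char → List Int
  | [] => []
  | c :: t => runGo c 1 t

theorem runGo_ne_nil (c : Char) (n : Int) (t : List Char) : runGo c n t ≠ [] := by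
  induction t generalizing c n with
  | nil => simp [runGo]
  | cons d t ih => simp only [runGo]; split <;> simp [ih]

theorem runGo_spec (t : List Char) (c : Char) (n : Int) :
    runGo c n t = (n + ((t.takeWhile (· = c)).length : Int)) :: runsOf (t.dropWhile (· = c)) := by
  induction t generalizing c n with
  | nil => simp [runGo, runsOf]
  | cons d t ih =>
    by_cases h : d = c
    · subst h
      simp only [runGo, if_pos rfl, List.takeWhile, List.dropWhile, decide_true, ih,
        List.length_cons]
      congr 1
      push_cast
      ring
    · simp [runGo, h, List.takeWhile, List.dropWhile, runsOf]

theorem runGo_replicate_same (k : Nat) (c : Char) (n : Int) :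
    runGo c n (List.replicate k c) = [n + k] := by
  induction k generalizing n with
  | zero => simp [runGo]
  | succ k ih => simp [List.replicate, runGo, ih]; push_cast; ring

-- appending a run of k copies of c to a nonempty scan

theorem getLastD_of_ne_nil {α : Type} (l : List α) (a b : α) (h : l ≠ []) :
    l.getLastD a = l.getLastD b := by
  rw [List.getLastD_eq_getLast?, List.getLastD_eq_getLast?, List.getLast?_eq_some_getLast h]
  rfl

theorem runGo_append_replicate (r : List Char) (d : Char) (n : Int) (k : Nat) (c : Char)
    (hk : 0 < k) :
    runGo d n (r ++ List.replicate k c) =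
      if (d :: r).getLastD d = c
      then (runGo d n r).dropLast ++ [(runGo d n r).getLastD 0 + (k : Int)]
      else runGo d n r ++ [(k : Int)] := by
  induction r generalizing d n with
  | nil =>
    by_cases h : d = c
    · subst h
      simp [runGo, runGo_replicate_same]
    · have hcd : ¬ c = d := fun hh => h hh.symm
      obtain ⟨k', rfl⟩ : ∃ k', k = k' + 1 := ⟨k - 1, by omega⟩
      simp only [List.nil_append, List.replicate, runGo, if_neg hcd, runGo_replicate_same,
        List.getLastD, if_neg h]
      rw [if_neg (by simp [h]), List.singleton_append, List.cons.injEq, List.cons.injEq]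
      refine ⟨rfl, by omega, rfl⟩
  | cons x r ih =>
    have hlast : (d :: x :: r).getLastD d = (x :: r).getLastD x := by
      rw [List.getLastD_cons]
      exact getLastD_of_ne_nil _ _ _ (by simp)
    by_cases h : x = d
    · subst h
      simp only [List.cons_append, runGo, if_pos rfl, if_true, ih, hlast]
    · simp only [List.cons_append, runGo, if_neg h, ih, hlast]
      have hne := runGo_ne_nil x (1 : Int) r
      split
      · rw [List.dropLast_cons_of_ne_nil hne, List.getLastD_cons,
          getLastD_of_ne_nil _ n 0 hne]
        simp
      · simp

theorem foldB_eq (t : List Char) (acc : List Int) (p : Char) (n : Int) :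
    (t.foldl
      (fun (st : List Int × Char × Int) ch =>
        if ch = st.2.1 then (st.1, st.2.1, st.2.2 + 1) else (st.1 ++ [st.2.2], ch, 1))
      (acc, p, n)).1 ++ [(t.foldl
      (fun (st : List Int × Char × Int) ch =>
        if ch = st.2.1 then (st.1, st.2.1, st.2.2 + 1) else (st.1 ++ [st.2.2], ch, 1))
      (acc, p, n)).2.2] = acc ++ runGo p n t := by
  induction t generalizing acc p n with
  | nil => simp [runGo]
  | cons d t ih =>
    by_cases h : d = p
    · simp only [List.foldl_cons, h, if_pos rfl, runGo]
      exact ih acc p (n + 1)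
    · simp only [List.foldl_cons, if_neg h, runGo, if_neg h]
      rw [ih (acc ++ [n]) d 1, List.append_assoc]
      rfl

theorem foldA_core (t : List Char) (c : Char) (acc : List Int) (n : Int) (l : List Char)
    (j : Nat) (h : l.drop j = c :: t) :
    ((List.range t.length).foldl
      (fun (st : List Int × Int) k =>
        match l[j + k]?, l[j + k + 1]? with
        | some a, some b => if a = b then (st.1, st.2 + 1) else (st.1 ++ [st.2], 1)
        | _, _ => st) (acc, n)).1 ++ [((List.range t.length).foldl
      (fun (st : List Int × Int) k =>
        match l[j + k]?, l[j + k + 1]? with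
        | some a, some b => if a = b then (st.1, st.2 + 1) else (st.1 ++ [st.2], 1)
        | _, _ => st) (acc, n)).2] = acc ++ runGo c n t := by
  induction t generalizing c acc n j with
  | nil => simp [runGo]
  | cons d t ih =>
    have hjc : l[j + 0]? = some c := by
      have := @List.getElem?_drop _ l j 0
      rw [h] at this; simpa using this.symm
    have hjd : l[j + 0 + 1]? = some d := by
      have := @List.getElem?_drop _ l j 1
      rw [h] at this
      rw [show j + 0 + 1 = j + 1 by omega]
      simpa using this.symm
    have hdrop : l.drop (j + 1) = d :: t := by
      rw [← List.tail_drop, h]; rfl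
    simp only [List.length_cons, List.range_succ_eq_map, List.foldl_cons, List.foldl_map]
    rw [hjc, hjd]
    have hcongr : ∀ (st : List Int × Int), ∀ k ∈ List.range t.length,
        (fun (st : List Int × Int) k =>
          match l[j + Nat.succ k]?, l[j + Nat.succ k + 1]? with
          | some a, some b => if a = b then (st.1, st.2 + 1) else (st.1 ++ [st.2], 1)
          | _, _ => st) st k
        = (fun (st : List Int × Int) k =>
          match l[(j + 1) + k]?, l[(j + 1) + k + 1]? with
          | some a, some b => if a = b then (st.1, st.2 + 1) else (st.1 ++ [st.2], 1)
          | _, _ => st) st k := by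
      intro st k _
      simp only [Nat.succ_eq_add_one]
      rw [show j + (k + 1) = (j + 1) + k by omega]
    rw [PySem.List.foldl_congr_mem _ _ _ _ hcongr]
    by_cases hcd : c = d
    · subst hcd
      have h2 := ih c acc (n + 1) (j + 1) hdrop
      simpa [runGo] using h2
    · have hdc : ¬ (d = c) := fun hh => hcd hh.symm
      have h2 := ih d (acc ++ [n]) 1 (j + 1) hdrop
      simp only [] at h2
      simp [runGo, hcd, hdc, h2]

theorem foldA_eq (t : List Char) (c : Char) (acc : List Int) (n : Int) :
    ((PySem.List.pyRange 0 (((c :: t).length : Int) - 1)).foldl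
      (fun (st : List Int × Int) j =>
        match PySem.List.pyGet? (c :: t) j, PySem.List.pyGet? (c :: t) (j + 1) with
        | some a, some b => if a = b then (st.1, st.2 + 1) else (st.1 ++ [st.2], 1)
        | _, _ => st) (acc, n)).1 ++ [((PySem.List.pyRange 0 (((c :: t).length : Int) - 1)).foldl
      (fun (st : List Int × Int) j =>
        match PySem.List.pyGet? (c :: t) j, PySem.List.pyGet? (c :: t) (j + 1) with
        | some a, some b => if a = b then (st.1, st.2 + 1) else (st.1 ++ [st.2], 1)
        | _, _ => st) (acc, n)).2] = acc ++ runGo c n t := by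
  have e : (((c :: t).length : Int) - 1) = ((t.length : Nat) : Int) := by
    simp [List.length_cons]
  rw [e, PySem.List.pyRange_zero_natCast, List.foldl_map]
  have hcongr : ∀ (st : List Int × Int), ∀ k ∈ List.range t.length,
      (fun (st : List Int × Int) (k : Nat) =>
        match PySem.List.pyGet? (c :: t) (k : Int), PySem.List.pyGet? (c :: t) ((k : Int) + 1) with
        | some a, some b => if a = b then (st.1, st.2 + 1) else (st.1 ++ [st.2], 1)
        | _, _ => st) st k
      = (fun (st : List Int × Int) (k : Nat) =>
        match (c :: t)[0 + k]?, (c :: t)[0 + k + 1]? with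
        | some a, some b => if a = b then (st.1, st.2 + 1) else (st.1 ++ [st.2], 1)
        | _, _ => st) st k := by
    intro st k _
    beta_reduce
    rw [show ((k : Int) + 1) = ((k + 1 : Nat) : Int) by push_cast; ring]
    simp only [PySem.List.pyGet?_natCast, Nat.zero_add]
  rw [PySem.List.foldl_congr_mem _ _ _ _ hcongr]
  exact foldA_core t c acc n (c :: t) 0 (by simp)

theorem loopA_spec (u : List Char) (j : Nat) (l : List Char) (c : Char)
    (h : l.drop j = c :: u) :
    solutionLoopA l (j : Int) = some ((j : Int) + ((u.takeWhile (· = c)).length : Int)) := by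
  induction u generalizing j c with
  | nil =>
    have hlen : l.length = j + 1 := by
      have := congrArg List.length h
      simp [List.length_drop] at this
      omega
    rw [solutionLoopA]
    have hj : (j : Int) = (l.length : Int) - 1 := by omega
    simp [hj]
  | cons d u ih =>
    have hlen : l.length = j + 2 + u.length := by
      have := congrArg List.length h
      simp [List.length_drop] at this
      omega
    have hjc : l[j]? = some c := by
      have := @List.getElem?_drop _ l j 0
      rw [h] at this; simpa using this.symm
    have hjd : l[j+1]? = some d := by
      have := @List.getElem?_drop _ l j 1
      rw [h] at this; simpa using this.symm
    have hne : ¬ ((j : Int) = (l.length : Int) - 1) := by omega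
    rw [solutionLoopA, if_neg hne]
    have g1 : PySem.List.pyGet? l (j : Int) = some c := by
      simpa [PySem.List.pyGet?_natCast] using hjc
    have g2 : PySem.List.pyGet? l ((j : Int) + 1) = some d := by
      rw [show ((j : Int) + 1) = ((j + 1 : Nat) : Int) by push_cast; ring,
        PySem.List.pyGet?_natCast]
      exact hjd
    rw [g1, g2]
    by_cases hcd : c = d
    · subst hcd
      have hdrop : l.drop (j + 1) = c :: u := by
        rw [← List.tail_drop, h]; rfl
      have := ih (j + 1) c hdrop
      rw [show (((j : Nat) + 1 : Nat) : Int) = (j : Int) + 1 by push_cast; ring] at this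
      simp only [ne_eq, not_true_eq_false, ite_false, this, List.takeWhile, decide_true,
        List.length_cons]
      congr 1
      push_cast
      ring
    · have : ¬ (d = c) := fun hh => hcd hh.symm
      simp [hcd, List.takeWhile, this]

theorem sorted_eq_of_perm (xs ys : List Int) (h : xs.Perm ys) :
    PySem.List.sorted xs (fun x => x) false = PySem.List.sorted ys (fun x => x) false := by
  refine List.Perm.eq_of_pairwise (fun a b _ _ hab hba => le_antisymm hab hba)
    (PySem.List.sorted_pairwise xs _) (PySem.List.sorted_pairwise ys _)
    (((PySem.List.sorted_perm xs _ _).trans h).trans (PySem.List.sorted_perm ys _ _).symm)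

-- ===== VERDICT (by name: the statement is the Claim_ definition above) =====
theorem solutionA_char (s : String) (c : Char) (t : List Char) (hl : s.toList = c :: t) :
    solution s = PySem.List.sorted
      (runsOf (t.dropWhile (· = c) ++
        List.replicate ((t.takeWhile (· = c)).length + 1) c)) (fun x => x) false := by
  have hloop : solutionLoopA (c :: t) 0 = some (((t.takeWhile (· = c)).length : Nat) : Int) := by
    have := loopA_spec t 0 (c :: t) c (by simp)
    simpa using this
  set k0 := (t.takeWhile (· = c)).length with hk0
  have hk0le : k0 ≤ t.length := by
    rw [hk0]; exact (List.takeWhile_sublist _).length_le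
  have htw : t.takeWhile (· = c) = List.replicate k0 c := by
    refine List.eq_replicate_iff.mpr ⟨rfl, fun b hb => ?_⟩
    have := List.mem_takeWhile_imp hb
    simpa using this
  have hsplit : t = List.replicate k0 c ++ t.dropWhile (· = c) := by
    conv_lhs => rw [← List.takeWhile_append_dropWhile (p := fun x => decide (x = c)) (l := t)]
    rw [htw]
  have htake : (c :: t).take (k0 + 1) = List.replicate (k0 + 1) c := by
    rw [List.take_succ_cons]
    conv_lhs => rw [hsplit]
    rw [List.take_left' (by simp), List.replicate_succ]
  have hdrop2 : (c :: t).drop (k0 + 1) = t.dropWhile (· = c) := by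
    rw [List.drop_succ_cons]
    conv_lhs => rw [hsplit]
    rw [List.drop_left' (by simp)]
  have hl2 : ((c :: t) ++ (c :: t).take (k0 + 1)).drop (k0 + 1)
      = t.dropWhile (· = c) ++ List.replicate (k0 + 1) c := by
    rw [List.drop_append, hdrop2, htake]
    have : k0 + 1 - (c :: t).length = 0 := by simp; omega
    rw [this, List.drop_zero]
  simp only [solution, hl, hloop]
  rw [show ((k0 : Int) + 1) = ((k0 + 1 : Nat) : Int) by push_cast; ring,
    PySem.List.slice_to_natCast, PySem.List.slice_from_natCast, hl2]
  cases hdw : t.dropWhile (· = c) with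
  | nil =>
    simp only [List.nil_append]
    rw [List.replicate_succ, foldA_eq (List.replicate k0 c) c [] 1]
    simp only [List.nil_append]
    congr 1
  | cons d r =>
    rw [List.cons_append, foldA_eq (r ++ List.replicate (k0 + 1) c) d [] 1]
    simp [runsOf]

theorem solutionB_char (s : String) (c : Char) (t : List Char) (hl : s.toList = c :: t) :
    solution_alt s = PySem.List.sorted
      (if 1 < (runGo c 1 t).length ∧ t.getLastD c = c
       then ((runGo c 1 t).headD 0 + (runGo c 1 t).getLastD 0) :: (runGo c 1 t).tail.dropLast
       else runGo c 1 t) (fun x => x) false := by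
  simp only [solution_alt, hl, List.foldl_cons, if_pos rfl, eq_self_iff_true, if_true,
    Nat.zero_add, zero_add]
  rw [foldB_eq t [] c 1, List.nil_append]

theorem solution_spec : Claim_equal_solution := by
  intro s _ hpre
  unfold Spec_solution
  obtain ⟨c, t, hl⟩ : ∃ c t, s.toList = c :: t := by
    cases h : s.toList with
    | nil => exact absurd h hpre
    | cons c t => exact ⟨c, t, rfl⟩
  rw [solutionA_char s c t hl, solutionB_char s c t hl]
  set k0 := (t.takeWhile (· = c)).length with hk0
  have hrg : runGo c 1 t
      = (1 + (k0 : Int)) :: runsOf (t.dropWhile (· = c)) := runGo_spec t c 1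
  cases hdw : t.dropWhile (· = c) with
  | nil =>
    rw [hdw] at hrg
    rw [hrg]
    simp only [List.nil_append, List.replicate_succ, runsOf]
    rw [runGo_replicate_same]
    simp
  | cons d r =>
    rw [hdw] at hrg
    have htw : t.takeWhile (· = c) = List.replicate k0 c := by
      refine List.eq_replicate_iff.mpr ⟨rfl, fun b hb => ?_⟩
      have := List.mem_takeWhile_imp hb
      simpa using this
    have hsplit : t = List.replicate k0 c ++ (d :: r) := by
      conv_lhs => rw [← List.takeWhile_append_dropWhile (p := fun x => decide (x = c)) (l := t)]
      rw [htw, hdw]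
    have hlastt : t.getLastD c = (d :: r).getLastD d := by
      rw [hsplit, List.getLastD_eq_getLast?, List.getLastD_eq_getLast?, List.getLast?_append,
        List.getLast?_eq_some_getLast (l := d :: r) (by simp)]
      rfl
    have hGne := runGo_ne_nil d 1 r
    rw [List.cons_append]
    simp only [runsOf]
    rw [runGo_append_replicate r d 1 (k0 + 1) c (by omega)]
    rw [hrg, hlastt]
    simp only [runsOf]
    have hcnt : 1 < ((1 + (k0 : Int)) :: runGo d 1 r).length := by
      simp only [List.length_cons]
      have : runGo d 1 r ≠ [] := hGne
      cases h : runGo d 1 r with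
      | nil => exact absurd h this
      | cons a b => simp
    by_cases hlast : (d :: r).getLastD d = c
    · rw [if_pos hlast, if_pos ⟨hcnt, hlast⟩]
      apply sorted_eq_of_perm
      simp only [List.headD_cons, List.tail_cons, List.getLastD_cons,
        getLastD_of_ne_nil _ (1 + (k0 : Int)) 0 hGne]
      rw [show ((runGo d 1 r).getLastD 0 + ((k0 : Nat) + 1 : Nat) : Int)
          = (1 + (k0 : Int)) + (runGo d 1 r).getLastD 0 by push_cast; ring]
      exact List.perm_append_singleton _ _
    · rw [if_neg hlast, if_neg (by rintro ⟨-, h2⟩; exact hlast h2)]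
      apply sorted_eq_of_perm
      rw [show (((k0 : Nat) + 1 : Nat) : Int) = 1 + (k0 : Int) by push_cast; ring]
      exact List.perm_append_singleton _ _
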